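-- pv_equiv track=rewrite | github.com/dutyangSinye/rssZspaceDownloader | utils/image_utils.py | _score_image
-- ===== SOURCE A (Python) =====
-- from typing import Dict, List, Tuple
--
-- def _score_image(tokens: List[str], tags: List[str]) -> int:
--     tags_lower = [t.lower() for t in tags]
--     score = 0
--     for token in tokens:
--         for tag in tags_lower:
--             if token == tag:
--                 score += 4
--             elif token in tag or tag in token:
--                 score += 2
--     return score
-- ===== SOURCE B (Python) =====
-- def _score_image(tokens, tags):
--     tags_lower = [t.lower() for t in tags]
--     counter = {}
--     for tag in tags_lower:
--         counter[tag] = counter.get(tag, 0) + 1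
--     equal_count = sum(counter.get(token, 0) for token in tokens)
--     containment_count = sum(1 for token in tokens for tag in tags_lower
--                             if token in tag or tag in token)
--     return 2 * equal_count + 2 * containment_count
-- ===== Notes on version B (the rewrite author's own statement) =====
-- stated objective: alternative
-- what changed: Replaces the per-pair 4/2/0 branch with two independent tallies: exact matches via a tag-frequency dictionary built once (no equality test in the pair loop) plus a branch-free containment count, using that equality implies containment so each equal pair scores 2+2=4.
import Mathlib
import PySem

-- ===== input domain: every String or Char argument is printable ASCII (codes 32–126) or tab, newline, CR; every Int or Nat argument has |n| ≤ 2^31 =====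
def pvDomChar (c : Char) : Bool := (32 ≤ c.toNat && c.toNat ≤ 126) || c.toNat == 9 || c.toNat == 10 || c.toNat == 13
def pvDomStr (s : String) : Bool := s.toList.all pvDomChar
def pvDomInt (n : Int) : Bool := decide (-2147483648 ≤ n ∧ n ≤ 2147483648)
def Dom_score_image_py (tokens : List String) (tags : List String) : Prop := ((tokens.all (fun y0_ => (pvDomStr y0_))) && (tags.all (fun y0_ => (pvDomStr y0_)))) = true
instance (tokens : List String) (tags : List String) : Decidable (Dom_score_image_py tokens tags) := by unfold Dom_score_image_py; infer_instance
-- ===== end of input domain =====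

-- B replaces A's 4/2/0 per-pair branch by two independent tallies (a tag-frequency dict for
-- exact matches plus a branch-free containment count); alternative decomposition, same cost.

-- ===== PORT A =====
def score_image_py (tokens : List String) (tags : List String) : Int :=
  let tags_lower := tags.map PySem.Str.lower
  tokens.foldl (fun score token =>
    tags_lower.foldl (fun score tag =>
      if token == tag then score + 4
      else if PySem.Str.isIn token tag || PySem.Str.isIn tag token then score + 2
      else score) score) 0

-- ===== PORT B =====
def score_image_py_alt (tokens : List String) (tags : List String) : Int :=
  let tags_lower := tags.map PySem.Str.lower
  let counter : PySem.Dict String Int :=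
    tags_lower.foldl (fun d t => d.insert t (d.getD t 0 + 1)) PySem.Dict.empty
  let equal_count : Int :=
    tokens.foldl (fun s token => s + counter.getD token 0) 0
  let containment_count : Int :=
    tokens.foldl (fun s token =>
      tags_lower.foldl (fun s tag =>
        s + (if PySem.Str.isIn token tag || PySem.Str.isIn tag token then 1 else 0)) s) 0
  2 * equal_count + 2 * containment_count

-- ===== PRECONDITION & SPEC =====
def Spec_score_image_py (tokens : List String) (tags : List String) (out : Int) : Prop := out = score_image_py_alt tokens tags
instance (tokens : List String) (tags : List String) (out : Int) : Decidable (Spec_score_image_py tokens tags out) := by unfold Spec_score_image_py; infer_instance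

-- ===== CLAIM (what is proved, stated in full; the proofs are below) =====
def Claim_equal_score_image_py : Prop := ∀ (tokens : List String) (tags : List String), Dom_score_image_py tokens tags → Spec_score_image_py tokens tags (score_image_py tokens tags)

-- ===== LEMMAS AND PROOFS =====

-- A's inner-loop contribution per (token, tag) pair
def pvA (token tag : String) : Int :=
  if token == tag then 4
  else if PySem.Str.isIn token tag || PySem.Str.isIn tag token then 2 else 0

lemma pvA_split (token tag : String) :
    pvA token tag = (if tag == token then (2:Int) else 0)
      + (if PySem.Str.isIn token tag || PySem.Str.isIn tag token then (2:Int) else 0) := by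
  unfold pvA
  by_cases h : token = tag
  · subst h
    have hc : PySem.Chars.isIn token.toList token.toList = true :=
      (PySem.Chars.isIn_iff_infix _ _).mpr (List.infix_refl _)
    simp [hc]
  · have h1 : (token == tag) = false := beq_eq_false_iff_ne.mpr h
    have h2 : (tag == token) = false := beq_eq_false_iff_ne.mpr (Ne.symm h)
    simp only [h1, h2, Bool.false_eq_true, if_false, zero_add]

lemma sum_indicator_eq_count (token : String) (l : List String) :
    (l.map (fun tag => if tag == token then (2:Int) else 0)).sum
      = 2 * (l.count token : Int) := by
  induction l with
  | nil => simp
  | cons x xs ih =>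
    simp only [List.map_cons, List.sum_cons, List.count_cons, ih]
    by_cases h : (x == token) = true <;>
      simp only [h, if_true, Bool.false_eq_true, if_false] <;> push_cast <;> ring

lemma getD_counterLoop (l : List String) (k : String) :
    (l.foldl (fun d t => d.insert t (d.getD t 0 + 1)) PySem.Dict.empty).getD k 0
      = (l.count k : Int) := by
  rw [PySem.Dict.foldl_insert_getD_add_one_eq_counter]
  exact PySem.Dict.getD_counter l k

lemma sum_if_two {a : Type} (l : List a) (p : a -> Bool) :
    (l.map (fun x => if p x then (2:Int) else 0)).sum
      = 2 * (l.map (fun x => if p x then (1:Int) else 0)).sum := by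
  induction l with
  | nil => simp
  | cons x xs ih =>
    simp only [List.map_cons, List.sum_cons, ih]
    split_ifs <;> ring

lemma sum_add_split {a : Type} (l : List a) (f g : a -> Int) :
    (l.map (fun x => f x + g x)).sum = (l.map f).sum + (l.map g).sum := by
  induction l with
  | nil => simp
  | cons x xs ih =>
    simp only [List.map_cons, List.sum_cons, ih]
    ring

lemma sum_two_mul {a : Type} (l : List a) (f : a -> Int) :
    (l.map (fun x => 2 * f x)).sum = 2 * (l.map f).sum := by
  induction l with
  | nil => simp
  | cons x xs ih =>
    simp only [List.map_cons, List.sum_cons, ih]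
    ring

-- ===== VERDICT (by name: the statement is the Claim_ definition above) =====
theorem score_image_py_spec : Claim_equal_score_image_py := by
  intro tokens tags _
  unfold Spec_score_image_py score_image_py score_image_py_alt
  set L := tags.map PySem.Str.lower with hL
  -- rewrite A's inner loop as an additive fold of pvA
  have hA : ∀ (s : Int) (token : String),
      L.foldl (fun score tag =>
        if token == tag then score + 4
        else if PySem.Str.isIn token tag || PySem.Str.isIn tag token then score + 2
        else score) s
      = s + (L.map (fun tag => pvA token tag)).sum := by
    intro s token
    have : (fun (score : Int) tag =>
        if token == tag then score + 4
        else if PySem.Str.isIn token tag || PySem.Str.isIn tag token then score + 2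
        else score)
      = fun (score : Int) tag => score + pvA token tag := by
      funext score tag
      unfold pvA
      split_ifs <;> ring
    rw [this, PySem.List.foldl_add]
  have hB : ∀ (s : Int) (token : String),
      L.foldl (fun s tag =>
        s + (if PySem.Str.isIn token tag || PySem.Str.isIn tag token then (1:Int) else 0)) s
      = s + (L.map (fun tag =>
          if PySem.Str.isIn token tag || PySem.Str.isIn tag token then (1:Int) else 0)).sum := by
    intro s token
    rw [PySem.List.foldl_add]
  -- flatten all outer folds into sums
  have houterA : tokens.foldl (fun score token =>
      L.foldl (fun score tag =>
        if token == tag then score + 4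
        else if PySem.Str.isIn token tag || PySem.Str.isIn tag token then score + 2
        else score) score) 0
      = (tokens.map (fun token => (L.map (fun tag => pvA token tag)).sum)).sum := by
    have : (fun (score : Int) token =>
        L.foldl (fun score tag =>
          if token == tag then score + 4
          else if PySem.Str.isIn token tag || PySem.Str.isIn tag token then score + 2
          else score) score)
      = fun (score : Int) token => score + (L.map (fun tag => pvA token tag)).sum := by
      funext score token; exact hA score token
    rw [this, PySem.List.foldl_add]; simp
  have houterBc : tokens.foldl (fun s token =>
      L.foldl (fun s tag =>
        s + (if PySem.Str.isIn token tag || PySem.Str.isIn tag token then (1:Int) else 0)) s) 0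
      = (tokens.map (fun token => (L.map (fun tag =>
          if PySem.Str.isIn token tag || PySem.Str.isIn tag token then (1:Int) else 0)).sum)).sum := by
    have : (fun (s : Int) token =>
        L.foldl (fun s tag =>
          s + (if PySem.Str.isIn token tag || PySem.Str.isIn tag token then (1:Int) else 0)) s)
      = fun (s : Int) token => s + (L.map (fun tag =>
          if PySem.Str.isIn token tag || PySem.Str.isIn tag token then (1:Int) else 0)).sum := by
      funext s token; exact hB s token
    rw [this, PySem.List.foldl_add]; simp
  have houterBe : tokens.foldl (fun s token =>
      s + (L.foldl (fun d t => d.insert t (d.getD t 0 + 1)) PySem.Dict.empty).getD token 0) 0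
      = (tokens.map (fun token => (L.count token : Int))).sum := by
    rw [PySem.List.foldl_add]
    simp only [getD_counterLoop, zero_add]
  simp only []
  rw [houterA, houterBe, houterBc]
  -- per-token identity, then distribute the sums
  have hper : ∀ token, (L.map (fun tag => pvA token tag)).sum
      = 2 * (L.count token : Int)
        + 2 * (L.map (fun tag =>
            if PySem.Str.isIn token tag || PySem.Str.isIn tag token then (1:Int) else 0)).sum := by
    intro token
    calc (L.map (fun tag => pvA token tag)).sum
        = (L.map (fun tag => (if tag == token then (2:Int) else 0)
            + (if PySem.Str.isIn token tag || PySem.Str.isIn tag token then (2:Int) else 0))).sum := by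
          simp only [pvA_split]
      _ = (L.map (fun tag => if tag == token then (2:Int) else 0)).sum
            + (L.map (fun tag =>
                if PySem.Str.isIn token tag || PySem.Str.isIn tag token then (2:Int) else 0)).sum := by
          exact sum_add_split L _ _
      _ = 2 * (L.count token : Int)
            + 2 * (L.map (fun tag =>
                if PySem.Str.isIn token tag || PySem.Str.isIn tag token then (1:Int) else 0)).sum := by
          rw [sum_indicator_eq_count]
          congr 1
          exact sum_if_two L (fun tag => PySem.Str.isIn token tag || PySem.Str.isIn tag token)
  simp only [hper]
  rw [sum_add_split, sum_two_mul, sum_two_mul]
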